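-- pv_equiv track=rewrite | github.com/ra0013/GHOST | config/integration.py | _find_best_table_match
-- ===== SOURCE A (Python) =====
-- from typing import List, Dict, Any, Optional
--
-- def _find_best_table_match(target_table: str, available_tables: List[str]) -> Optional[str]:
--     """Find the best matching table name"""
--     target_lower = target_table.lower()
--
--     # Exact match
--     for table in available_tables:
--         if table.lower() == target_lower:
--             return table
--
--     # Partial match
--     for table in available_tables:
--         if target_lower in table.lower() or table.lower() in target_lower:
--             return table
--
--     # If no match, return the first table (fallback)
--     return available_tables[0] if available_tables else None
-- ===== SOURCE B (Python) =====
-- def _find_best_table_match(target_table, available_tables):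
--     """Find the best matching table name (single pass, two first-hit accumulators)"""
--     target_lower = target_table.lower()
--     exact = None
--     partial = None
--     for table in available_tables:
--         t = table.lower()
--         if t == target_lower:
--             if exact is None:
--                 exact = table
--         elif (target_lower in t or t in target_lower) and partial is None:
--             partial = table
--     if exact is not None:
--         return exact
--     if partial is not None:
--         return partial
--     return available_tables[0] if available_tables else None
-- ===== Notes on version B (the rewrite author's own statement) =====
-- stated objective: alternative
-- what changed: replaces A's two ordered scans (exact pass, then partial pass) with one single pass that keeps two first-hit accumulators (first exact, first partial) and resolves exact-before-partial after the loop
import Mathlib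
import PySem

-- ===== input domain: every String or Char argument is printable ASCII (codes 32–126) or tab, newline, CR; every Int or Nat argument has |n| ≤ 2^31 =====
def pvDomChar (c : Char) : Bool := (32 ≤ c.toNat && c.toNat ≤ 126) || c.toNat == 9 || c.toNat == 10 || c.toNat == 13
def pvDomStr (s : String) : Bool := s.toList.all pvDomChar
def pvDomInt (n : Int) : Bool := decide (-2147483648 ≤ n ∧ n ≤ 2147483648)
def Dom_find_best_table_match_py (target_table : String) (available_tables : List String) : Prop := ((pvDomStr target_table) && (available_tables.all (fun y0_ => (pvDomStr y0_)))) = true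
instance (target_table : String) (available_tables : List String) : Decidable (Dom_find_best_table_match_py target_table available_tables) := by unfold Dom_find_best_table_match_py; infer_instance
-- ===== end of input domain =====

-- B replaces A's two ordered scans with one pass holding two first-hit accumulators; objective: alternative (same cost).

-- ===== PORT A =====
-- first loop of A: return the first table whose lowercase equals target_lower
def pvLoopExact (target_lower : String) : List String → Option String
  | [] => none
  | table :: rest =>
    if PySem.Str.lower table == target_lower then some table
    else pvLoopExact target_lower rest

-- second loop of A: return the first table with a substring match either way
def pvLoopPartial (target_lower : String) : List String → Option String
  | [] => none
  | table :: rest =>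
    if PySem.Str.isIn target_lower (PySem.Str.lower table)
        || PySem.Str.isIn (PySem.Str.lower table) target_lower then some table
    else pvLoopPartial target_lower rest

def find_best_table_match_py (target_table : String) (available_tables : List String) : Option String :=
  let target_lower := PySem.Str.lower target_table
  match pvLoopExact target_lower available_tables with
  | some t => some t
  | none =>
    match pvLoopPartial target_lower available_tables with
    | some t => some t
    | none => if available_tables.isEmpty then none else available_tables.head?

-- ===== PORT B =====
-- one step of B's single loop over the tables, updating (exact, partial) first-hit accumulators
def pvStep (target_lower : String) (acc : Option String × Option String) (table : String) :
    Option String × Option String :=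
  let t := PySem.Str.lower table
  if t == target_lower then
    (if acc.1.isNone then (some table, acc.2) else acc)
  else if (PySem.Str.isIn target_lower t || PySem.Str.isIn t target_lower) && acc.2.isNone then
    (acc.1, some table)
  else acc

def find_best_table_match_py_alt (target_table : String) (available_tables : List String) : Option String :=
  let target_lower := PySem.Str.lower target_table
  let acc := available_tables.foldl (pvStep target_lower) (none, none)
  match acc.1 with
  | some t => some t
  | none =>
    match acc.2 with
    | some t => some t
    | none => if available_tables.isEmpty then none else available_tables.head?

-- ===== PRECONDITION & SPEC =====
def Spec_find_best_table_match_py (target_table : String) (available_tables : List String) (out : Option String) : Prop := out = find_best_table_match_py_alt target_table available_tables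
instance (target_table : String) (available_tables : List String) (out : Option String) : Decidable (Spec_find_best_table_match_py target_table available_tables out) := by unfold Spec_find_best_table_match_py; infer_instance

-- ===== CLAIM (what is proved, stated in full; the proofs are below) =====
def Claim_equal_find_best_table_match_py : Prop := ∀ (target_table : String) (available_tables : List String), Dom_find_best_table_match_py target_table available_tables → Spec_find_best_table_match_py target_table available_tables (find_best_table_match_py target_table available_tables)

-- ===== LEMMAS AND PROOFS =====

-- once the exact accumulator is set it never changes
theorem pvFold_fst_some (tl : String) (ts : List String) (a : String) (p : Option String) :
    (ts.foldl (pvStep tl) (some a, p)).1 = some a := by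
  induction ts generalizing p with
  | nil => rfl
  | cons t rest ih =>
    simp only [List.foldl_cons, pvStep]
    split_ifs <;> simp_all

-- once the partial accumulator is set it never changes
theorem pvFold_snd_some (tl : String) (ts : List String) (e : Option String) (b : String) :
    (ts.foldl (pvStep tl) (e, some b)).2 = some b := by
  induction ts generalizing e with
  | nil => rfl
  | cons t rest ih =>
    simp only [List.foldl_cons, pvStep]
    split_ifs <;> simp_all

-- the exact accumulator ends up as A's first exact-scan result
theorem pvFold_fst (tl : String) (ts : List String) (p : Option String) :
    (ts.foldl (pvStep tl) (none, p)).1 = pvLoopExact tl ts := by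
  induction ts generalizing p with
  | nil => rfl
  | cons t rest ih =>
    simp only [List.foldl_cons, pvStep, pvLoopExact]
    split_ifs <;> simp_all [pvFold_fst_some]

-- when no exact match exists, the partial accumulator ends up as A's partial-scan result
theorem pvFold_snd (tl : String) (ts : List String)
    (h : pvLoopExact tl ts = none) :
    (ts.foldl (pvStep tl) (none, (none : Option String))).2 = pvLoopPartial tl ts := by
  induction ts with
  | nil => rfl
  | cons t rest ih =>
    rw [pvLoopExact] at h
    by_cases hc : (PySem.Str.lower t == tl) = true
    · rw [if_pos hc] at h; exact absurd h (by simp)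
    · rw [if_neg hc] at h
      have hc' : (PySem.Str.lower t == tl) = false := by simpa using hc
      by_cases hp : (PySem.Str.isIn tl (PySem.Str.lower t)
          || PySem.Str.isIn (PySem.Str.lower t) tl) = true
      · simp only [List.foldl_cons, pvStep, pvLoopPartial, hc', hp]
        simp [pvFold_snd_some]
      · have hp' : (PySem.Str.isIn tl (PySem.Str.lower t)
            || PySem.Str.isIn (PySem.Str.lower t) tl) = false := by simpa using hp
        simp only [List.foldl_cons, pvStep, pvLoopPartial, hc', hp']
        simpa using ih h

-- ===== VERDICT (by name: the statement is the Claim_ definition above) =====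
theorem find_best_table_match_py_spec : Claim_equal_find_best_table_match_py := by
  intro target_table available_tables _
  unfold Spec_find_best_table_match_py find_best_table_match_py find_best_table_match_py_alt
  cases hE : pvLoopExact (PySem.Str.lower target_table) available_tables with
  | some a =>
    have h1 := pvFold_fst (PySem.Str.lower target_table) available_tables none
    rw [hE] at h1
    simp [hE, h1]
  | none =>
    have h1 := pvFold_fst (PySem.Str.lower target_table) available_tables none
    rw [hE] at h1
    have h2 := pvFold_snd (PySem.Str.lower target_table) available_tables hE
    simp only [hE, h1, h2]
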